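-- pv_equiv track=rewrite | github.com/SiddhantaGupta/advent-of-code | 2023/day13/main.py | checkReflection
-- ===== SOURCE A (Python) =====
-- def checkReflection(m, i, smudge):
--     l, r = i, i+1
--     diff = 1
--     while True:
--         if l < 0 or r > len(m) - 1:
--             if smudge > 0:
--                 return (-1, -1)
--             else:
--                 return (i, i+1)
--         if m[l] != m[r]:
--             if smudge > 0:
--                 smudge -= 1
--                 if not smudgyReflection(m[l], m[r]):
--                     return (-1, -1)
--             else:
--                 return (-1, -1)
--         l -= diff
--         r += diff
--
-- def smudgyReflection(a, b):
--     for i in range(0, len(a)):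
--         ax = list(a)
--         ax[i] = "#" if ax[i] == "." else "."
--         ax = "".join(ax)
--         if ax == b:
--             return True
--
--     return False
-- ===== SOURCE B (Python) =====
-- def _oneFlip(a, b):
--     if len(a) != len(b):
--         return False
--     diffs = [(x, y) for x, y in zip(a, b) if x != y]
--     return len(diffs) == 1 and diffs[0][1] == ("#" if diffs[0][0] == "." else ".")
--
--
-- def checkReflection(m, i, smudge):
--     n = len(m)
--     if 0 <= i < n - 1:
--         budget = smudge
--         for a, b in zip(reversed(m[:i + 1]), m[i + 1:]):
--             if a != b:
--                 if budget <= 0 or not _oneFlip(a, b):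
--                     return (-1, -1)
--                 budget -= 1
--         return (-1, -1) if budget > 0 else (i, i + 1)
--     return (-1, -1) if smudge > 0 else (i, i + 1)
-- ===== Notes on version B (the rewrite author's own statement) =====
-- stated objective: alternative
-- what changed: B replaces A's unbounded while-loop with moving indices and its try-every-flip smudge test by a single zip over the two mirrored slices with a scan that collects the mismatching positions of a row pair and checks there is exactly one, flipped the right way.
import Mathlib
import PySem

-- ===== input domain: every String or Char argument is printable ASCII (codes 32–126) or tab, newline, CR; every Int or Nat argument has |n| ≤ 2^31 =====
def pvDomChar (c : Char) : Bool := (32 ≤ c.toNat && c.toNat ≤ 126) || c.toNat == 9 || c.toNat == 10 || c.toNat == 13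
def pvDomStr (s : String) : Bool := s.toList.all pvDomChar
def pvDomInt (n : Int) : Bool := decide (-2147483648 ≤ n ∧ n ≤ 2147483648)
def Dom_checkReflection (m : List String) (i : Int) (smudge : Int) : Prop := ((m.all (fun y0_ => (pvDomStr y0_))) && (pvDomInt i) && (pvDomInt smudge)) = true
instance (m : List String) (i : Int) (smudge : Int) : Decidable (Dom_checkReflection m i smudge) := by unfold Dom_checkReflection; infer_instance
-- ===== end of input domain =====

-- B replaces the expanding two-index while-loop and its try-every-flip smudge test
-- by a single zip over the two mirrored slices with a one-mismatch scan (objective: alternative).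

-- ===== PORT A =====
-- smudgyReflection(a, b): try flipping each position of a and compare with b (early return → any)
def smudgyReflection (a b : String) : Bool :=
  (List.range a.toList.length).any (fun j =>
    let ax := a.toList
    let ax := ax.set j (if ax.getD j ' ' == '.' then '#' else '.')
    String.ofList ax == b)

-- the 'while True' loop of A, with its two moving indices l, r (diff = 1)
def checkReflectionLoop (m : List String) (i : Int) (l r smudge : Int) : List Int :=
  if _h : l < 0 ∨ (m.length : Int) - 1 < r then
    if 0 < smudge then [-1, -1] else [i, i + 1]
  else
    if (PySem.List.pyGet? m l).getD "" ≠ (PySem.List.pyGet? m r).getD "" then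
      if 0 < smudge then
        if ¬ smudgyReflection ((PySem.List.pyGet? m l).getD "") ((PySem.List.pyGet? m r).getD "") then [-1, -1]
        else checkReflectionLoop m i (l - 1) (r + 1) (smudge - 1)
      else [-1, -1]
    else checkReflectionLoop m i (l - 1) (r + 1) smudge
  termination_by (l + 1).toNat
  decreasing_by all_goals omega

def checkReflection (m : List String) (i : Int) (smudge : Int) : List Int :=
  checkReflectionLoop m i i (i + 1) smudge

-- ===== PORT B =====
-- _oneFlip(a, b): exactly one mismatching position, whose right char is the flip of the left one
def oneFlip (a b : String) : Bool :=
  if a.toList.length ≠ b.toList.length then false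
  else
    let diffs := (a.toList.zip b.toList).filter (fun p => p.1 ≠ p.2)
    diffs.length == 1 &&
      (diffs.getD 0 (' ', ' ')).2 == (if (diffs.getD 0 (' ', ' ')).1 == '.' then '#' else '.')

-- the for-loop over the zipped row pairs; none = early 'return (-1, -1)', some = remaining budget
def altLoop (pairs : List (String × String)) (budget : Int) : Option Int :=
  match pairs with
  | [] => some budget
  | (a, b) :: rest =>
    if a ≠ b then
      if budget ≤ 0 ∨ oneFlip a b = false then none
      else altLoop rest (budget - 1)
    else altLoop rest budget

def checkReflection_alt (m : List String) (i : Int) (smudge : Int) : List Int :=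
  if 0 ≤ i ∧ i < (m.length : Int) - 1 then
    match altLoop (((PySem.List.slice m none (some (i + 1))).reverse).zip
                   (PySem.List.slice m (some (i + 1)) none)) smudge with
    | none => [-1, -1]
    | some budget => if 0 < budget then [-1, -1] else [i, i + 1]
  else
    if 0 < smudge then [-1, -1] else [i, i + 1]

-- ===== PRECONDITION & SPEC =====
def Spec_checkReflection (m : List String) (i : Int) (smudge : Int) (out : List Int) : Prop := out = checkReflection_alt m i smudge
instance (m : List String) (i : Int) (smudge : Int) (out : List Int) : Decidable (Spec_checkReflection m i smudge out) := by unfold Spec_checkReflection; infer_instance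

-- ===== CLAIM (what is proved, stated in full; the proofs are below) =====
def Claim_equal_checkReflection : Prop := ∀ (m : List String) (i : Int) (smudge : Int), Dom_checkReflection m i smudge → Spec_checkReflection m i smudge (checkReflection m i smudge)

-- ===== LEMMAS AND PROOFS =====

theorem ofList_beq (l : List Char) (b : String) : (String.ofList l == b) = (l == b.toList) := by
  rw [Bool.eq_iff_iff]
  simp only [beq_iff_eq]
  constructor
  · intro h; rw [← h]; simp
  · intro h; rw [h]; simp


def smudgyL (x y : List Char) : Bool :=
  (List.range x.length).any (fun j => x.set j (if x.getD j ' ' == '.' then '#' else '.') == y)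

def oneFlipL (x y : List Char) : Bool :=
  if x.length ≠ y.length then false
  else
    let diffs := (x.zip y).filter (fun p => p.1 ≠ p.2)
    diffs.length == 1 &&
      (diffs.getD 0 (' ', ' ')).2 == (if (diffs.getD 0 (' ', ' ')).1 == '.' then '#' else '.')

def flipR : List Char → List Char → Bool
  | [], _ => false
  | _ :: _, [] => false
  | c :: x', d :: y' =>
    (((if c == '.' then '#' else '.') == d) && (x' == y')) || ((c == d) && flipR x' y')

theorem fc_ne (c : Char) : (if c == '.' then '#' else '.') ≠ c := by
  by_cases h : c = '.' <;> simp [h]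
  intro hc; rw [← hc] at h; exact h rfl

theorem zip_all_eq : ∀ (u v : List Char),
    (u.length = v.length ∧ ∀ a b, (a, b) ∈ u.zip v → a = b) ↔ u = v := by
  intro u
  induction u with
  | nil => intro v; cases v <;> simp
  | cons c u' ih =>
    intro v
    cases v with
    | nil => simp
    | cons d v' =>
      simp only [List.length_cons, Nat.add_right_cancel_iff, List.zip_cons_cons, List.mem_cons,
        List.cons.injEq]
      constructor
      · rintro ⟨h1, h2⟩
        refine ⟨h2 c d (Or.inl rfl), (ih v').mp ⟨h1, fun a b hab => h2 a b (Or.inr hab)⟩⟩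
      · rintro ⟨h1, h2⟩
        subst h1; subst h2
        refine ⟨rfl, fun a b hab => ?_⟩
        rcases hab with h | h
        · exact (Prod.mk.injEq _ _ _ _ ▸ h).1.trans (Prod.mk.injEq _ _ _ _ ▸ h).2.symm
        · exact ((ih u').mpr rfl).2 a b h

theorem oneFlipL_eq_flipR : ∀ (x y : List Char), oneFlipL x y = flipR x y := by
  intro x
  induction x with
  | nil => intro y; cases y <;> rfl
  | cons c x' ih =>
    intro y
    cases y with
    | nil => rfl
    | cons d y' =>
      by_cases h : c = d
      · subst h
        have hfc : ¬((if c = '.' then '#' else '.') = c) := by simpa using fc_ne c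
        rw [show flipR (c :: x') (c :: y') = flipR x' y' by simp [flipR, hfc], ← ih y']
        simp only [oneFlipL, List.length_cons, ne_eq, Nat.add_right_cancel_iff,
          List.zip_cons_cons, List.filter_cons]
        simp
      · rw [show flipR (c :: x') (d :: y') =
              (((if c == '.' then '#' else '.') == d) && (x' == y')) by simp [flipR, h]]
        rw [Bool.eq_iff_iff]
        simp only [oneFlipL, List.length_cons, ne_eq, Nat.add_right_cancel_iff,
          List.zip_cons_cons, List.filter_cons]
        simp [h]
        constructor
        · rintro ⟨h1, h2, h3⟩
          exact ⟨h3.symm, (zip_all_eq x' y').mp ⟨h1, h2⟩⟩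
        · rintro ⟨h1, h2⟩
          obtain ⟨hl, hp⟩ := (zip_all_eq x' y').mpr h2
          exact ⟨hl, hp, h1.symm⟩

theorem smudgyL_eq_flipR : ∀ (x y : List Char), smudgyL x y = flipR x y := by
  intro x
  induction x with
  | nil => intro y; simp [smudgyL, flipR]
  | cons c x' ih =>
    intro y
    rw [show smudgyL (c :: x') y =
          (((if c == '.' then '#' else '.') :: x' == y) ||
            (List.range x'.length).any (fun j =>
              (c :: x'.set j (if x'.getD j ' ' == '.' then '#' else '.')) == y)) by
      simp only [smudgyL, List.length_cons, List.range_succ_eq_map, List.any_cons,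
        List.any_map, Function.comp_def, List.set_cons_succ, List.getD_cons_succ,
        List.set_cons_zero, List.getD_cons_zero]]
    cases y with
    | nil => simp [flipR]
    | cons d y' =>
      by_cases h : c = d
      · subst h
        simp only [flipR, List.cons_beq_cons, ← ih y', smudgyL]
        simp
      · have hb : (c == d) = false := by simp [h]
        simp only [flipR, List.cons_beq_cons, hb]
        simp

theorem smudgy_eq_oneFlip (a b : String) : smudgyReflection a b = oneFlip a b := by
  have h1 : smudgyReflection a b = smudgyL a.toList b.toList := by
    simp only [smudgyReflection, smudgyL, ofList_beq]
  have h2 : oneFlip a b = oneFlipL a.toList b.toList := rfl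
  rw [h1, h2, smudgyL_eq_flipR, oneFlipL_eq_flipR]

-- the sequence of mirrored row pairs A's loop visits from (l, r)
def pairsOf (m : List String) (l r : Int) : List (String × String) :=
  if l < 0 ∨ (m.length : Int) - 1 < r then []
  else ((PySem.List.pyGet? m l).getD "", (PySem.List.pyGet? m r).getD "") :: pairsOf m (l - 1) (r + 1)
  termination_by (l + 1).toNat
  decreasing_by omega

theorem loopA_eq (m : List String) (i : Int) : ∀ (l r s : Int),
    checkReflectionLoop m i l r s =
      (match altLoop (pairsOf m l r) s with
       | none => [-1, -1]
       | some b => if 0 < b then [-1, -1] else ([i, i + 1] : List Int)) := by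
  intro l r s
  fun_induction checkReflectionLoop m i l r s <;> rw [pairsOf] <;>
    first
      | (rw [if_pos (by omega)]; simp_all [altLoop])
      | (rw [if_neg (by omega)]; simp_all [altLoop, ← smudgy_eq_oneFlip]; try rw [if_neg (by omega)])

theorem pairsOf_eq_zip_aux (m : List String) : ∀ (k : Nat) (l r : Int), (l + 1).toNat = k →
    -1 ≤ l → l < (m.length : Int) → 0 ≤ r →
    pairsOf m l r = ((m.take (l + 1).toNat).reverse).zip (m.drop r.toNat) := by
  intro k
  induction k with
  | zero =>
    intro l r hk h1 h2 h3
    have hl : l = -1 := by omega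
    subst hl
    rw [pairsOf, if_pos (by omega)]
    simp
  | succ k ih =>
    intro l r hk h1 h2 h3
    have hl0 : 0 ≤ l := by omega
    by_cases hr : (m.length : Int) - 1 < r
    · rw [pairsOf, if_pos (Or.inr hr)]
      have : m.length ≤ r.toNat := by omega
      rw [List.drop_eq_nil_of_le this, List.zip_nil_right]
    · rw [pairsOf, if_neg (by omega)]
      have hlt : l.toNat < m.length := by omega
      have hrt : r.toNat < m.length := by omega
      have h1' : (l + 1).toNat = l.toNat + 1 := by omega
      rw [h1', List.take_add_one, List.reverse_append]
      have : m[l.toNat]? = some m[l.toNat] := List.getElem?_eq_getElem hlt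
      rw [this]
      rw [List.drop_eq_getElem_cons hrt]
      simp only [Option.toList_some]
      rw [PySem.List.pyGet?_of_nonneg _ hl0, PySem.List.pyGet?_of_nonneg _ h3]
      rw [List.getElem?_eq_getElem hlt, List.getElem?_eq_getElem hrt]
      simp only [Option.getD_some]
      have e1 : (l - 1 + 1).toNat = l.toNat := by omega
      have e2 : (r + 1).toNat = r.toNat + 1 := by omega
      rw [ih (l - 1) (r + 1) (by omega) (by omega) (by omega) (by omega), e1, e2]
      rw [List.reverse_singleton]
      rw [show [m[l.toNat]] ++ (List.take l.toNat m).reverse = m[l.toNat] :: (List.take l.toNat m).reverse from List.singleton_append]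
      rw [List.zip_cons_cons]

theorem pairsOf_eq_zip (m : List String) (l r : Int) (h1 : -1 ≤ l) (h2 : l < (m.length : Int))
    (h3 : 0 ≤ r) : pairsOf m l r = ((m.take (l + 1).toNat).reverse).zip (m.drop r.toNat) :=
  pairsOf_eq_zip_aux m (l + 1).toNat l r rfl h1 h2 h3

-- ===== VERDICT (by name: the statement is the Claim_ definition above) =====
theorem checkReflection_spec : Claim_equal_checkReflection := by
  intro m i smudge _
  unfold Spec_checkReflection checkReflection checkReflection_alt
  rw [loopA_eq]
  by_cases h : 0 ≤ i ∧ i < (m.length : Int) - 1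
  · rw [if_pos h, pairsOf_eq_zip m i (i + 1) (by omega) (by omega) (by omega),
        PySem.List.slice_to m (show (0:Int) ≤ i + 1 by omega), PySem.List.slice_from m (show (0:Int) ≤ i + 1 by omega)]
  · rw [if_neg h, pairsOf, if_pos (by omega)]
    simp [altLoop]
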